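-- pv_equiv track=rewrite | github.com/mfosco/JARVIS | pramp_practice.py | index_equals_value_search
-- ===== SOURCE A (Python) =====
-- def index_equals_value_search(arr):
--     lim = len(arr)
--     left = 0
--     right = lim - 1
--
--     while left <= right:
--         i = int((left + right) / 2)
--         if arr[i] - i < 0:
--             left = i + 1
--         elif (arr[i] - i == 0) and ((i == 0) or arr[i - 1] - (i - 1) < 0):
--             return i
--         else:
--             right = i - 1
--
--     return -1
-- ===== SOURCE B (Python) =====
-- def index_equals_value_search(arr):
--     # recursive divide-and-conquer on sublist windows with an index offset
--     def rec(sub, off):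
--         if not sub:
--             return -1
--         m = (len(sub) - 1) // 2
--         i = off + m
--         d = sub[m] - i
--         if d < 0:
--             return rec(sub[m + 1:], i + 1)
--         if d == 0 and (i == 0 or arr[i - 1] < i - 1):
--             return i
--         return rec(sub[:m], off)
--     return rec(arr, 0)
-- ===== Notes on version B (the rewrite author's own statement) =====
-- stated objective: alternative
-- what changed: A's iterative while-loop binary search over (left, right) index state is replaced by a recursive divide-and-conquer helper that carries the current sublist window plus an index offset and recurses on slices of it.
import Mathlib
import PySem

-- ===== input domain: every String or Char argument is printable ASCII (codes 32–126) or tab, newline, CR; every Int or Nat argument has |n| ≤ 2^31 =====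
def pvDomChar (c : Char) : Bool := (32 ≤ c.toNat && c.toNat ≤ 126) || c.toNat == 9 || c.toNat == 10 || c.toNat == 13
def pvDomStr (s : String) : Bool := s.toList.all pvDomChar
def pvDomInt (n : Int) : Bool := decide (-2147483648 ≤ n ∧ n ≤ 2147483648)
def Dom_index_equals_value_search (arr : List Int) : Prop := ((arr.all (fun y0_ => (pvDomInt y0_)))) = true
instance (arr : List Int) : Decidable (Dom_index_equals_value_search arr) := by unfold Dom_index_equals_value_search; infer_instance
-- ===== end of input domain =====

-- B replaces A's iterative binary-search loop by a recursive divide-and-conquer on sublist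
-- windows carried with an index offset (alternative decomposition; same asymptotic search,
-- list slicing adds linear copying per level in Python).

-- ===== PORT A =====
-- the while loop of A, state (left, right); fuel only bounds the iteration count (the loop
-- shrinks right-left each step, so fuel = len(arr) always suffices and the 0 case is never
-- the one that answers); 'int((left+right)/2)' is exact truncated division here
-- (|left+right| < 2^53), ported as Int.tdiv; arr[i] is always in range on the reachable
-- states (0 <= left <= i <= right < len), so the getD default is never used
def pyLoopA (arr : List Int) : Nat → Int → Int → Int
  | 0, _, _ => -1
  | fuel + 1, left, right =>
    if left ≤ right then
      let i := (left + right).tdiv 2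
      if PySem.List.pyGetD arr i 0 - i < 0 then pyLoopA arr fuel (i + 1) right
      else if PySem.List.pyGetD arr i 0 - i = 0 ∧
          (i = 0 ∨ PySem.List.pyGetD arr (i - 1) 0 - (i - 1) < 0) then i
      else pyLoopA arr fuel left (i - 1)
    else -1

def index_equals_value_search (arr : List Int) : Int :=
  pyLoopA arr arr.length 0 ((arr.length : Int) - 1)

-- ===== PORT B =====
-- rec(sub, off): sub[m+1:] and sub[:m] with 0 <= m are List.drop / List.take; fuel only
-- bounds the recursion depth (the window shrinks each step, so fuel = len(arr) suffices);
-- sub[m] has m = (len-1)/2 < len, so the getD default is never used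
def recB (arr : List Int) : Nat → List Int → Int → Int
  | 0, _, _ => -1
  | fuel + 1, sub, off =>
    if sub.isEmpty then -1
    else
      let m : Nat := (sub.length - 1) / 2
      let i : Int := off + (m : Int)
      let d := sub.getD m 0 - i
      if d < 0 then recB arr fuel (sub.drop (m + 1)) (i + 1)
      else if d = 0 ∧ (i = 0 ∨ PySem.List.pyGetD arr (i - 1) 0 < i - 1) then i
      else recB arr fuel (sub.take m) off

def index_equals_value_search_alt (arr : List Int) : Int := recB arr arr.length arr 0

-- ===== PRECONDITION & SPEC =====
def Spec_index_equals_value_search (arr : List Int) (out : Int) : Prop := out = index_equals_value_search_alt arr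
instance (arr : List Int) (out : Int) : Decidable (Spec_index_equals_value_search arr out) := by unfold Spec_index_equals_value_search; infer_instance

-- ===== CLAIM (what is proved, stated in full; the proofs are below) =====
def Claim_equal_index_equals_value_search : Prop := ∀ (arr : List Int), Dom_index_equals_value_search arr → Spec_index_equals_value_search arr (index_equals_value_search arr)

-- ===== LEMMAS AND PROOFS =====

-- A's loop midpoint lies between left and right
theorem tdiv2_bounds (l r : Int) (h : l ≤ r) : l ≤ (l + r).tdiv 2 ∧ (l + r).tdiv 2 ≤ r := by
  have h1 : Int.tdiv (l + r) 2 = (l + r) / 2 + if 0 ≤ l + r ∨ (2:Int) ∣ l + r then 0 else Int.sign 2 :=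
    Int.tdiv_eq_ediv
  have h2 : Int.sign 2 = 1 := rfl
  split_ifs at h1 <;> omega

-- midpoint as Euclidean division when the sum is nonnegative
theorem tdiv2_eq_ediv (l r : Int) (h : 0 ≤ l + r) : (l + r).tdiv 2 = (l + r) / 2 := by
  have h1 : Int.tdiv (l + r) 2 = (l + r) / 2 + if 0 ≤ l + r ∨ (2:Int) ∣ l + r then 0 else Int.sign 2 :=
    Int.tdiv_eq_ediv
  simp only [h, true_or, if_true] at h1
  omega

-- loop invariant: A's loop on [l, r] equals B's recursion on the window arr[l..r] with offset l
theorem loop_eq_rec (arr : List Int) : ∀ (n : Nat) (l r : Int), 0 ≤ l → r < (arr.length : Int) →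
    (r + 1 - l).toNat ≤ n →
    pyLoopA arr n l r = recB arr n ((arr.take (r + 1).toNat).drop l.toNat) l := by
  intro n
  induction n with
  | zero =>
    intro l r hl hr hn
    rfl
  | succ n ih =>
    intro l r hl hr hn
    by_cases hlr : l ≤ r
    · have hlen : ((arr.take (r + 1).toNat).drop l.toNat).length = (r + 1 - l).toNat := by
        simp; omega
      have hne : ((arr.take (r + 1).toNat).drop l.toNat).isEmpty = false := by
        simp; omega
      have hib := tdiv2_bounds l r hlr
      have hie : (l + r).tdiv 2 = (l + r) / 2 := tdiv2_eq_ediv l r (by omega)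
      have hneP : ¬ (((arr.take (r + 1).toNat).drop l.toNat).isEmpty = true) := by
        simp [hne]
      rw [pyLoopA, recB]
      rw [if_pos hlr, if_neg hneP]
      simp only [hlen]
      set i : Int := (l + r).tdiv 2 with hidef
      set m : Nat := ((r + 1 - l).toNat - 1) / 2 with hmdef
      have him : l + (m : Int) = i := by omega
      have hil : i < (arr.length : Int) := by omega
      have hval : ((arr.take (r + 1).toNat).drop l.toNat).getD m 0 = PySem.List.pyGetD arr i 0 := by
        have hmlt : m < ((arr.take (r + 1).toNat).drop l.toNat).length := by omega
        rw [List.getD_eq_getElem _ _ hmlt,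
            PySem.List.pyGetD_eq_getElem arr 0 (by omega) hil]
        simp only [List.getElem_drop, List.getElem_take]
        congr 1
        omega
      rw [hval, him]
      by_cases h1 : PySem.List.pyGetD arr i 0 - i < 0
      · rw [if_pos h1, if_pos h1]
        have hdrop : ((arr.take (r + 1).toNat).drop l.toNat).drop (m + 1)
            = (arr.take (r + 1).toNat).drop (i + 1).toNat := by
          rw [List.drop_drop]
          congr 1
          omega
        rw [hdrop]
        exact ih (i + 1) r (by omega) hr (by omega)
      · rw [if_neg h1, if_neg h1]
        by_cases h2 : PySem.List.pyGetD arr i 0 - i = 0 ∧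
            (i = 0 ∨ PySem.List.pyGetD arr (i - 1) 0 - (i - 1) < 0)
        · have h2' : PySem.List.pyGetD arr i 0 - i = 0 ∧
              (i = 0 ∨ PySem.List.pyGetD arr (i - 1) 0 < i - 1) :=
            ⟨h2.1, h2.2.imp id (by omega)⟩
          rw [if_pos h2, if_pos h2']
        · have h2' : ¬ (PySem.List.pyGetD arr i 0 - i = 0 ∧
              (i = 0 ∨ PySem.List.pyGetD arr (i - 1) 0 < i - 1)) := by
            intro hc
            exact h2 ⟨hc.1, hc.2.imp id (by omega)⟩
          rw [if_neg h2, if_neg h2']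
          have htake : ((arr.take (r + 1).toNat).drop l.toNat).take m
              = (arr.take (i - 1 + 1).toNat).drop l.toNat := by
            apply List.ext_getElem
            · simp; omega
            · intro k hk1 hk2
              simp only [List.getElem_take, List.getElem_drop]
          rw [htake]
          exact ih l (i - 1) hl (by omega) (by omega)
    · have hempty : ((arr.take (r + 1).toNat).drop l.toNat).isEmpty := by
        simp
        omega
      rw [pyLoopA, recB]
      simp [hlr, hempty]

-- ===== VERDICT (by name: the statement is the Claim_ definition above) =====
theorem index_equals_value_search_spec : Claim_equal_index_equals_value_search := by
  intro arr _
  unfold Spec_index_equals_value_search index_equals_value_search index_equals_value_search_alt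
  have h := loop_eq_rec arr arr.length 0 ((arr.length : Int) - 1) le_rfl (by omega) (by omega)
  rw [h]
  congr 1
  simp
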